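-- pv_equiv track=rewrite | github.com/Pev40/seguridad-lab | amsco/amsco.py | cifrar_amsco
-- ===== SOURCE A (Python) =====
-- import math
--
-- def ordenar_clave(clave):
--     clave = clave.upper()
--     letras = list(clave)
--     orden = sorted(list(set(letras)))
--     asignaciones = {}
--     contador = 1
--     for letra in orden:
--         asignaciones[letra] = contador
--         contador += 1
--
--     orden_columnas = []
--     for letra in letras:
--         orden_columnas.append(asignaciones[letra])
--
--     return orden_columnas
--
-- def cifrar_amsco(texto, clave):
--     texto = ''.join([char.upper() for char in texto if char.isalnum()])
--     num_columnas = len(clave)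
--     num_filas = math.ceil(len(texto) / num_columnas)
--     texto += 'X' * (num_filas * num_columnas - len(texto))
--     matriz = []
--     indice = 0
--     for _ in range(num_filas):
--         fila = []
--         for _ in range(num_columnas):
--             fila.append(texto[indice])
--             indice += 1
--         matriz.append(fila)
--     orden_columnas = ordenar_clave(clave)
--     columnas = list(zip(orden_columnas, range(num_columnas)))
--     columnas_sorted = sorted(columnas, key=lambda x: x[0])
--     texto_cifrado = ""
--     for _, idx in columnas_sorted:
--         for fila in matriz:
--             texto_cifrado += fila[idx]
--
--     return texto_cifrado
-- ===== SOURCE B (Python) =====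
-- def cifrar_amsco(texto, clave):
--     datos = ''.join(c.upper() for c in texto if c.isalnum())
--     n = len(clave)
--     filas = -(-len(datos) // n)
--     datos += 'X' * (filas * n - len(datos))
--     k = clave.upper()
--     orden = sorted(range(n), key=lambda i: k[i])
--     return ''.join(datos[i::n] for i in orden)
-- ===== Notes on version B (the rewrite author's own statement) =====
-- stated objective: simpler
-- what changed: B never builds the 2D matrix or the rank dictionary: it sorts the column indices directly by the uppercased key letter (a stable sort reproduces A's rank-plus-index tie-break) and reads each column as the stride slice datos[i::n], replacing A's matrix construction and nested row/column loops.
import Mathlib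
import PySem

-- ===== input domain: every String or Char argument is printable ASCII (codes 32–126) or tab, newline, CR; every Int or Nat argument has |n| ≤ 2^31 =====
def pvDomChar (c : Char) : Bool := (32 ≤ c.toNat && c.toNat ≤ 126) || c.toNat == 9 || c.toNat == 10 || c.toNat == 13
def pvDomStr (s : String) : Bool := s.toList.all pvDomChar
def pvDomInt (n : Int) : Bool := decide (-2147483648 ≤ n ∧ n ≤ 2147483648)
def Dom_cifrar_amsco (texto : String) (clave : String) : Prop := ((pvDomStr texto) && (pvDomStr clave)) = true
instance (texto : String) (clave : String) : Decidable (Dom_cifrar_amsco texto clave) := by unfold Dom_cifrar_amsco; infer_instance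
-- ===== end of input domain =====

-- B drops A's 2D matrix and rank dictionary: it sorts the column indices by the uppercased key
-- letter (a stable sort gives the same tie-break as A's rank+index sort) and reads each column
-- as the stride slice datos[i::n]. Objective: simpler. Equivalence of the return values is proved
-- for every non-empty clave (empty clave: both Pythons raise ZeroDivisionError).

-- ===== PORT A =====
-- helper: Python's ordenar_clave
def ordenar_clave (clave : String) : List Int :=
  let letras := PySem.Chars.upper clave.toList
  let orden := PySem.List.sorted (PySem.Set.ofList letras) (fun x => x) false
  -- for letra in orden: asignaciones[letra] = contador; contador += 1
  let st := orden.foldl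
    (fun (st : PySem.Dict Char Int × Int) letra => (st.1.insert letra st.2, st.2 + 1))
    ((PySem.Dict.empty : PySem.Dict Char Int), 1)
  -- for letra in letras: orden_columnas.append(asignaciones[letra])  (key always present)
  letras.foldl (fun acc letra => acc ++ [st.1.getD letra 0]) []

def cifrar_amsco (texto : String) (clave : String) : String :=
  let texto := (texto.toList.filter PySem.Chars.isalnum).map PySem.Chars.upperChar
  let num_columnas : Int := PySem.Chars.len clave.toList
  -- math.ceil(len(texto) / num_columnas) as ceiling division (exact for these sizes)
  let num_filas : Int := -(PySem.Int.floordiv (-(PySem.Chars.len texto)) num_columnas)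
  let texto := texto ++ PySem.List.pyRepeat ['X'] (num_filas * num_columnas - PySem.Chars.len texto)
  -- matrix build: nested loops with a running index (texto[indice] always in range)
  let st := (PySem.List.pyRange 0 num_filas 1).foldl
    (fun (st : List (List Char) × Int) _ =>
      let fin := (PySem.List.pyRange 0 num_columnas 1).foldl
        (fun (fi : List Char × Int) _ => (fi.1 ++ [PySem.List.pyGetD texto fi.2 'X'], fi.2 + 1))
        (([] : List Char), st.2)
      (st.1 ++ [fin.1], fin.2))
    (([] : List (List Char)), 0)
  let matriz := st.1
  let orden_columnas := ordenar_clave clave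
  let columnas := orden_columnas.zip (PySem.List.pyRange 0 num_columnas 1)
  let columnas_sorted := PySem.List.sorted columnas (fun x => x.1) false
  -- for _, idx in columnas_sorted: for fila in matriz: texto_cifrado += fila[idx]  (idx in range)
  let texto_cifrado := columnas_sorted.foldl
    (fun acc p => matriz.foldl (fun acc fila => acc ++ [PySem.List.pyGetD fila p.2 'X']) acc) []
  String.ofList texto_cifrado

-- ===== PORT B =====
def cifrar_amsco_alt (texto : String) (clave : String) : String :=
  let datos := (texto.toList.filter PySem.Chars.isalnum).map PySem.Chars.upperChar
  let n : Int := PySem.Chars.len clave.toList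
  let filas : Int := -(PySem.Int.floordiv (-(PySem.Chars.len datos)) n)
  let datos := datos ++ PySem.List.pyRepeat ['X'] (filas * n - PySem.Chars.len datos)
  let k := PySem.Chars.upper clave.toList
  let orden := PySem.List.sorted (PySem.List.pyRange 0 n 1) (fun i => PySem.List.pyGetD k i 'X') false
  -- ''.join(datos[i::n] for i in orden); the slice never fails since n ≠ 0 under Pre_
  String.ofList (PySem.Chars.join []
    (orden.map (fun i => (PySem.List.slice? datos (some i) none n).getD [])))

-- ===== PRECONDITION & SPEC =====
-- Pre_ excludes only the empty clave, on which A raises ZeroDivisionError.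
def Pre_cifrar_amsco (texto : String) (clave : String) : Prop := clave ≠ ""
instance (texto : String) (clave : String) : Decidable (Pre_cifrar_amsco texto clave) := by
  unfold Pre_cifrar_amsco; infer_instance
def pvWitness_cifrar_amsco : String × String := ("Hola Mundo 42", "CLAVE")

def Spec_cifrar_amsco (texto : String) (clave : String) (out : String) : Prop := out = cifrar_amsco_alt texto clave
instance (texto : String) (clave : String) (out : String) : Decidable (Spec_cifrar_amsco texto clave out) := by unfold Spec_cifrar_amsco; infer_instance

-- ===== CLAIM (what is proved, stated in full; the proofs are below) =====
def Claim_equal_cifrar_amsco : Prop := ∀ (texto : String) (clave : String), Dom_cifrar_amsco texto clave → Pre_cifrar_amsco texto clave → Spec_cifrar_amsco texto clave (cifrar_amsco texto clave)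

-- ===== LEMMAS AND PROOFS =====


-- L1
lemma pv_insertBy_congr {α : Type} (b1 b2 : α → α → Bool) (x : α) (ys : List α)
    (h : ∀ y ∈ ys, b1 x y = b2 x y) : PySem.List.insertBy b1 x ys = PySem.List.insertBy b2 x ys := by
  induction ys with
  | nil => rfl
  | cons y t ih =>
    simp only [PySem.List.insertBy, h y (by simp)]
    split_ifs with hb
    · rfl
    · simpa using ih (fun z hz => h z (by simp [hz]))

-- L2
lemma pv_sorted_key_congr {α κ1 κ2 : Type} [LinearOrder κ1] [LinearOrder κ2]
    (xs : List α) (k1 : α → κ1) (k2 : α → κ2)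
    (h : ∀ a ∈ xs, ∀ b ∈ xs, (k1 a < k1 b ↔ k2 a < k2 b)) :
    PySem.List.sorted xs k1 false = PySem.List.sorted xs k2 false := by
  rw [PySem.List.sorted_eq_foldl_insertBy, PySem.List.sorted_eq_foldl_insertBy]
  have aux : ∀ (l : List α), (∀ a ∈ l, a ∈ xs) → ∀ (acc : List α), (∀ a ∈ acc, a ∈ xs) →
      l.foldl (fun acc x => PySem.List.insertBy (fun a b => decide (k1 a < k1 b)) x acc) acc =
      l.foldl (fun acc x => PySem.List.insertBy (fun a b => decide (k2 a < k2 b)) x acc) acc := by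
    intro l
    induction l with
    | nil => intro _ acc _; rfl
    | cons x t ih =>
      intro hl acc hacc
      simp only [List.foldl_cons]
      rw [pv_insertBy_congr _ (fun a b => decide (k2 a < k2 b)) x acc
        (fun y hy => decide_eq_decide.mpr (h x (hl x (by simp)) y (hacc y hy)))]
      exact ih (fun a ha => hl a (by simp [ha])) _
        (fun a ha => by
          rcases (PySem.List.mem_insertBy _ _ _ _).mp ha with rfl | ha
          · exact hl a (by simp)
          · exact hacc a ha)
  exact aux xs (fun a ha => ha) [] (by simp)

-- L3
lemma pv_insertBy_map {α β : Type} (g : α → β) (b' : β → β → Bool) (x : α) (ys : List α) :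
    (PySem.List.insertBy (fun a c => b' (g a) (g c)) x ys).map g
      = PySem.List.insertBy b' (g x) (ys.map g) := by
  induction ys with
  | nil => rfl
  | cons y t ih =>
    simp only [PySem.List.insertBy, List.map_cons]
    split_ifs with hb
    · simp
    · simpa using ih

lemma pv_sorted_map {α β κ : Type} [LT κ] [DecidableLT κ] (g : α → β) (k : β → κ) (xs : List α) :
    (PySem.List.sorted xs (fun a => k (g a)) false).map g
      = PySem.List.sorted (xs.map g) k false := by
  rw [PySem.List.sorted_eq_foldl_insertBy, PySem.List.sorted_eq_foldl_insertBy]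
  have aux : ∀ (l : List α) (acc : List α),
      (l.foldl (fun acc x => PySem.List.insertBy (fun a b => decide (k (g a) < k (g b))) x acc) acc).map g
        = (l.map g).foldl (fun acc x => PySem.List.insertBy (fun a b => decide (k a < k b)) x acc) (acc.map g) := by
    intro l
    induction l with
    | nil => intro acc; rfl
    | cons x t ih =>
      intro acc
      simp only [List.foldl_cons, List.map_cons]
      rw [ih, pv_insertBy_map g (fun a b => decide (k a < k b)) x acc]
  simpa using aux xs []

-- join with empty separator is flatten
lemma pv_join_empty (parts : List (List Char)) : PySem.Chars.join [] parts = parts.flatten := by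
  induction parts with
  | nil => rfl
  | cons p t ih => cases t <;> simp_all [PySem.Chars.join, List.intercalate, List.intersperse]

-- fold ignoring the element
lemma pv_foldl_ignore_arg {α σ : Type} (f : σ → σ) (l : List α) (s : σ) :
    l.foldl (fun s _ => f s) s = f^[l.length] s := by
  induction l generalizing s with
  | nil => rfl
  | cons x t ih => simp [List.foldl_cons, ih, Function.iterate_succ_apply]

-- inner row loop
lemma pv_inner_iter (datos : List Char) (m : Nat) (idx0 : Int) :
    (fun (fi : List Char × Int) => (fi.1 ++ [PySem.List.pyGetD datos fi.2 'X'], fi.2 + 1))^[m] (([] : List Char), idx0)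
      = ((List.range m).map (fun t : Nat => PySem.List.pyGetD datos (idx0 + (t:Int)) 'X'), idx0 + m) := by
  induction m with
  | zero => simp
  | succ m ih =>
    rw [Function.iterate_succ_apply', ih]
    simp [List.range_succ]

    ring_nf

-- outer loop
lemma pv_outer_iter (row : Int → List Char) (n : Nat) (F : Nat) :
    (fun (st : List (List Char) × Int) => (st.1 ++ [row st.2], st.2 + n))^[F] (([] : List (List Char)), 0)
      = ((List.range F).map (fun r => row ((r*n : Nat) : Int)), ((F*n : Nat) : Int)) := by
  induction F with
  | zero => simp
  | succ F ih =>
    rw [Function.iterate_succ_apply', ih]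
    simp [List.range_succ]

    ring

-- dict built by the contador loop: value of a key not in the list is unchanged
lemma pv_dict_fold_notmem (o : List Char) (a : Char) (ha : a ∉ o) :
    ∀ (d0 : PySem.Dict Char Int) (c0 : Int),
      ((o.foldl (fun st l => (st.1.insert l st.2, st.2 + 1)) (d0, c0)).1).getD a 0 = d0.getD a 0 := by
  induction o with
  | nil => intro d0 c0; rfl
  | cons x t ih =>
    intro d0 c0
    simp only [List.foldl_cons]
    have hat : a ∉ t := fun h => ha (List.mem_cons.mpr (Or.inr h))
    have hax : a ≠ x := fun h => ha (by simp [h])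
    rw [ih hat, PySem.Dict.getD_insert, if_neg hax]

-- dict built by the contador loop: rank = 1 + index
lemma pv_dict_fold_rank (o : List Char) (ho : o.Nodup) (a : Char) (ha : a ∈ o) :
    ∀ (d0 : PySem.Dict Char Int) (c0 : Int),
      ((o.foldl (fun st l => (st.1.insert l st.2, st.2 + 1)) (d0, c0)).1).getD a 0 = c0 + (o.idxOf a : Int) := by
  induction o with
  | nil => cases ha
  | cons x t ih =>
    intro d0 c0
    simp only [List.foldl_cons]
    by_cases hax : a = x
    · subst hax
      have hnt : a ∉ t := (List.nodup_cons.mp ho).1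
      rw [pv_dict_fold_notmem t a hnt]
      rw [PySem.Dict.getD_insert]
      simp
    · have hat : a ∈ t := by
        rcases List.mem_cons.mp ha with h | h
        · exact absurd h hax
        · exact h
      rw [ih (List.nodup_cons.mp ho).2 hat]
      simp [Ne.symm hax]
      omega

-- strictly increasing list: idxOf is order-reflecting
lemma pv_idxOf_lt_iff (o : List Char) (ho : o.Pairwise (· < ·)) (a b : Char)
    (ha : a ∈ o) (hb : b ∈ o) : (o.idxOf a < o.idxOf b) ↔ a < b := by
  have hmono := List.pairwise_iff_getElem.mp ho
  have hla : o.idxOf a < o.length := List.idxOf_lt_length_iff.mpr ha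
  have hlb : o.idxOf b < o.length := List.idxOf_lt_length_iff.mpr hb
  have hga : o[o.idxOf a] = a := List.getElem_idxOf hla
  have hgb : o[o.idxOf b] = b := List.getElem_idxOf hlb
  constructor
  · intro h
    have := hmono _ _ hla hlb h
    rwa [hga, hgb] at this
  · intro h
    rcases lt_trichotomy (o.idxOf a) (o.idxOf b) with h' | h' | h'
    · exact h'
    · exfalso; rw [← hga, ← hgb] at h; simp only [h'] at h; exact absurd h (lt_irrefl _)
    · have := hmono _ _ hlb hla h'
      rw [hga, hgb] at this
      exact absurd (h.trans this) (lt_irrefl _)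

lemma pv_slice_col (datos : List Char) (n F i : Nat) (hn : 0 < n) (hi : i < n)
    (hlen : datos.length = F * n) :
    PySem.List.slice? datos (some (i:Int)) none (n:Int)
      = some ((List.range F).map (fun r => datos.getD (r*n + i) 'X')) := by
  have hn' : (0:Int) < (n:Int) := by exact_mod_cast hn
  simp only [PySem.List.slice?, PySem.List.sliceIndices, hlen]
  rw [if_neg (show ¬((n:Int) = 0) by omega)]
  have h1 : ¬((i:Int) < 0) := by omega
  have h2 : ¬((n:Int) < 0) := by omega
  simp only [if_neg h1, if_neg h2, if_pos hn']
  rcases Nat.eq_zero_or_pos F with hF | hF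
  · subst hF; simp
  · have hmin : min (i:Int) ((F*n : Nat) : Int) = (i:Int) := by
      have : i ≤ F*n := le_trans (Nat.le_of_lt hi) (Nat.le_mul_of_pos_left n hF)
      simp; exact_mod_cast this
    rw [hmin, if_pos (by exact_mod_cast Nat.lt_of_lt_of_le hi (Nat.le_mul_of_pos_left n hF))]
    have hcnt : ((((F*n : Nat) : Int) - (i:Int) + (n:Int) - 1) / (n:Int)).toNat = F := by
      have he : (((F*n : Nat) : Int) - (i:Int) + (n:Int) - 1) = ((n:Int) - 1 - (i:Int)) + (F:Int) * (n:Int) := by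
        push_cast; ring
      rw [he, Int.add_mul_ediv_right _ _ (by omega), Int.ediv_eq_zero_of_lt (by omega) (by omega)]
      simp
    rw [hcnt]
    congr 1
    rw [List.filterMap_congr (g := some ∘ (fun r => datos.getD (r*n + i) 'X')) ?_, List.filterMap_eq_map]
    intro x hx
    have hxF : x < F := List.mem_range.mp hx
    have hb : i + n*x < F*n := by
      calc i + n*x < n + n*x := by omega
        _ = n*(x+1) := by ring
        _ ≤ n*F := Nat.mul_le_mul_left n hxF
        _ = F*n := Nat.mul_comm n F
    have hidx : ((i:Int) + (n:Int)*(x:Int)).toNat = i + n*x := by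
      have : ((i:Int) + (n:Int)*(x:Int)) = ((i + n*x : Nat) : Int) := by push_cast; ring
      rw [this, Int.toNat_natCast]
    have hb' : x*n + i < datos.length := by rw [hlen]; have := Nat.mul_comm x n; omega
    simp only [hidx, Function.comp_apply]
    rw [List.getElem?_eq_getElem (show i + n*x < datos.length by omega), List.getD_eq_getElem?_getD, List.getElem?_eq_getElem hb']
    simp only [Option.getD_some, Option.some.injEq]
    congr 1
    have := Nat.mul_comm x n
    omega


lemma pv_len_pyRange (m : Nat) : (PySem.List.pyRange 0 (m:Int) 1).length = m := by
  rw [PySem.List.pyRange_zero_natCast]; simp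

-- the main equivalence
lemma pv_main (texto clave : String) (hcs : clave.toList ≠ []) :
    cifrar_amsco texto clave = cifrar_amsco_alt texto clave := by
  have hn : 0 < clave.toList.length := List.length_pos_iff.mpr hcs
  simp only [cifrar_amsco, cifrar_amsco_alt, ordenar_clave, PySem.List.pyRepeat_singleton,
    PySem.Chars.len]
  set cs : List Char := clave.toList with hcs_def
  set n : Nat := cs.length with hn_def
  set letras : List Char := PySem.Chars.upper cs with hletras
  set D0 : List Char := (texto.toList.filter PySem.Chars.isalnum).map PySem.Chars.upperChar with hD0
  set L : Nat := D0.length with hL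
  set fI : Int := -PySem.Int.floordiv (-(L:Int)) (n:Int) with hfI
  set datos : List Char := D0 ++ List.replicate (fI * (n:Int) - (L:Int)).toNat 'X' with hdatos
  have hn' : (0:Int) < (n:Int) := by exact_mod_cast hn
  have hbra : (fI - 1) * (n:Int) < (L:Int) ∧ (L:Int) ≤ fI * (n:Int) :=
    (PySem.Int.neg_floordiv_neg_eq_iff_of_pos hn').mp hfI.symm
  have hfI0 : (0:Int) ≤ fI := by nlinarith [hbra.2, (Nat.cast_nonneg L : (0:Int) ≤ (L:Int))]
  set F : Nat := fI.toNat with hF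
  have hFfI : (F:Int) = fI := Int.toNat_of_nonneg hfI0
  have hcast : ((F*n : Nat) : Int) = fI * (n:Int) := by push_cast [hFfI]; ring
  have hdlen : datos.length = F * n := by
    have h2 : ((datos.length : Nat) : Int) = ((F*n:Nat):Int) := by
      simp [hdatos, ← hL]
      omega
    exact_mod_cast h2
  rw [← hFfI]
  simp only [pv_foldl_ignore_arg, pv_len_pyRange, pv_inner_iter,
    PySem.List.foldl_append_singleton_eq_map, List.nil_append]
  rw [pv_outer_iter (fun idx0 => (List.range n).map (fun t : Nat => PySem.List.pyGetD datos (idx0 + (t:Int)) 'X')) n F]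
  simp only [PySem.List.foldl_append_eq_flatMap, List.nil_append]
  set M : List (List Char) := (List.range F).map
      (fun r => (List.range n).map (fun t : Nat => PySem.List.pyGetD datos (((r*n : Nat):Int) + (t:Int)) 'X')) with hM
  have hletlen : letras.length = n := by simp [hletras, PySem.Chars.upper, hn_def]
  set O : List Char := PySem.List.sorted (PySem.Set.ofList letras) (fun x => x) false with hO
  have hOpair : O.Pairwise (· < ·) := PySem.List.sorted_ofList_pairwise_lt letras
  have hOno : O.Nodup := hOpair.imp ne_of_lt
  have hOmem : ∀ c : Char, c ∈ O ↔ c ∈ letras := by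
    intro c; rw [hO, PySem.List.mem_sorted, PySem.Set.mem_ofList]
  set rank : Char → Int := fun c =>
      (List.foldl (fun st letra => (st.1.insert letra st.2, st.2 + 1)) (PySem.Dict.empty, 1) O).1.getD c 0 with hrank
  have hrankeq : ∀ c ∈ letras, rank c = 1 + (O.idxOf c : Int) := fun c hc =>
    pv_dict_fold_rank O hOno c ((hOmem c).mpr hc) PySem.Dict.empty 1
  set P : List Int := PySem.List.pyRange 0 (n:Int) 1 with hP
  have hPeq : P = (List.range n).map (fun k : Nat => (k:Int)) := PySem.List.pyRange_zero_natCast n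
  have hPlen : P.length = n := by rw [hPeq]; simp
  set columnas : List (Int × Int) := (letras.map rank).zip P with hcol
  have hcollen : columnas.length = n := by
    simp [hcol, hletlen, hPlen]
  have hmemcol : ∀ p ∈ columnas, ∃ k, ∃ (hk : k < n), p = (rank (letras[k]'(by rw [hletlen]; exact hk)), (k:Int)) := by
    intro p hp
    rcases List.mem_iff_getElem.mp hp with ⟨j, hj, hpe⟩
    have hjn : j < n := by rwa [hcollen] at hj
    refine ⟨j, hjn, ?_⟩
    rw [← hpe]
    simp only [hcol, List.getElem_zip, List.getElem_map, hPeq, List.getElem_range]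
  have hget : ∀ (k : Nat) (hk : k < n), PySem.List.pyGetD letras (k:Int) 'X' = letras[k]'(by rw [hletlen]; exact hk) := by
    intro k hk
    rw [PySem.List.pyGetD_natCast, List.getD_eq_getElem?_getD,
      List.getElem?_eq_getElem (by rw [hletlen]; exact hk)]
    simp
  have hkeys : ∀ p ∈ columnas, ∀ q ∈ columnas,
      ((fun x : Int × Int => x.1) p < (fun x : Int × Int => x.1) q ↔
        (fun x : Int × Int => PySem.List.pyGetD letras x.2 'X') p < (fun x : Int × Int => PySem.List.pyGetD letras x.2 'X') q) := by
    intro p hp q hq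
    rcases hmemcol p hp with ⟨kp, hkp, rfl⟩
    rcases hmemcol q hq with ⟨kq, hkq, rfl⟩
    simp only
    rw [hget kp hkp, hget kq hkq, hrankeq _ (List.getElem_mem _), hrankeq _ (List.getElem_mem _)]
    have hia := pv_idxOf_lt_iff O hOpair _ _
      ((hOmem _).mpr (List.getElem_mem (by rw [hletlen]; exact hkp)))
      ((hOmem _).mpr (List.getElem_mem (by rw [hletlen]; exact hkq)))
    constructor
    · intro h; exact hia.mp (by omega)
    · intro h; have := hia.mpr h; omega
  rw [pv_sorted_key_congr columnas (fun x : Int × Int => x.1)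
    (fun x : Int × Int => PySem.List.pyGetD letras x.2 'X') hkeys]
  rw [pv_join_empty]
  have hsnd : (PySem.List.sorted columnas (fun x : Int × Int => PySem.List.pyGetD letras x.2 'X') false).map Prod.snd
      = PySem.List.sorted P (fun i => PySem.List.pyGetD letras i 'X') false := by
    rw [pv_sorted_map Prod.snd (fun i => PySem.List.pyGetD letras i 'X') columnas, hcol,
      List.map_snd_zip (by rw [hPlen, List.length_map, hletlen])]
  have hflat : ∀ (S : List (Int × Int)) (f : Int → List Char),
      S.flatMap (fun x => f x.2) = ((S.map Prod.snd).map f).flatten := by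
    intro S f
    rw [List.map_map, List.flatMap_def]
    rfl
  rw [hflat (PySem.List.sorted columnas (fun x : Int × Int => PySem.List.pyGetD letras x.2 'X') false)
    (fun i => M.map (fun fila => PySem.List.pyGetD fila i 'X')), hsnd]
  congr 1
  congr 1
  apply List.map_congr_left
  intro i hi
  have hiP : i ∈ (List.range n).map (fun k : Nat => (k:Int)) := by
    rw [← hPeq]
    exact (PySem.List.mem_sorted P _ false i).mp hi
  rcases List.mem_map.mp hiP with ⟨k, hkmem, rfl⟩
  have hk : k < n := List.mem_range.mp hkmem
  rw [pv_slice_col datos n F k hn hk hdlen, Option.getD_some]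
  simp only [hM, List.map_map]
  apply List.map_congr_left
  intro r hr
  simp only [Function.comp_apply]
  rw [PySem.List.pyGetD_natCast, List.getD_eq_getElem?_getD,
    List.getElem?_eq_getElem (by simp [hk])]
  simp only [List.getElem_map, List.getElem_range, Option.getD_some]
  have hcast2 : ((r*n : Nat):Int) + (k:Int) = ((r*n+k : Nat):Int) := by push_cast; ring
  rw [hcast2, PySem.List.pyGetD_natCast]

-- ===== VERDICT (by name: the statement is the Claim_ definition above) =====
theorem cifrar_amsco_spec : Claim_equal_cifrar_amsco := by
  intro texto clave _ hpre
  have hcs : clave.toList ≠ [] := by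
    intro h
    exact hpre (by cases clave with | _ s => cases s with | _ l => cases l <;> simp_all)
  exact pv_main texto clave hcs
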